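-- pv_equiv track=rewrite | github.com/jimmy058910/jmo-security-repo | .mcp-skills/test-pattern-matcher.py | extract_key_imports
-- ===== SOURCE A (Python) =====
-- from typing import Dict, List, Any
--
-- def extract_key_imports(content: str) -> List[str]:
--     """Extract key testing imports."""
--     imports = []
--
--     key_patterns = [
--         'import pytest',
--         'from unittest.mock import',
--         'from pathlib import Path',
--         'import json',
--         'from scripts.core.adapters',
--     ]
--
--     for pattern in key_patterns:
--         if pattern in content:
--             # Extract full line
--             for line in content.split('\n'):
--                 if pattern in line:
--                     imports.append(line.strip())
--                     break
--
--     return imports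
-- ===== SOURCE B (Python) =====
-- def extract_key_imports(content: str):
--     """Extract key testing imports (single pass over the lines, dict of first matches)."""
--     key_patterns = [
--         'import pytest',
--         'from unittest.mock import',
--         'from pathlib import Path',
--         'import json',
--         'from scripts.core.adapters',
--     ]
--     present = [p for p in key_patterns if p in content]
--     first_line = {}
--     for line in content.split('\n'):
--         for p in present:
--             if p not in first_line and p in line:
--                 first_line[p] = line.strip()
--     return [first_line[p] for p in present if p in first_line]
-- ===== Notes on version B (the rewrite author's own statement) =====
-- stated objective: alternative
-- what changed: B replaces A's per-pattern rescan of all lines by one pass over the lines that fills a dict mapping each present pattern to its first matching stripped line, then emits the dict entries in pattern order.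
import Mathlib
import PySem

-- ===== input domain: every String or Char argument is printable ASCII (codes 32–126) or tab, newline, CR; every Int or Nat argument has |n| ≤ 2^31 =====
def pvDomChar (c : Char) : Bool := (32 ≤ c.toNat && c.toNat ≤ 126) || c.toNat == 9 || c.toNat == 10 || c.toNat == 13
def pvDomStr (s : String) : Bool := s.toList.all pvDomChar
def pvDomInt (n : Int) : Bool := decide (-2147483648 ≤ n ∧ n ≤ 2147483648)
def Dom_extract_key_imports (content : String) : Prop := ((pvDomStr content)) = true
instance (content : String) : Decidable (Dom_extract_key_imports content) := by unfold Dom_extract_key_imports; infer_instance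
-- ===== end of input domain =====

-- B replaces A's per-pattern rescan of all lines by one pass over the lines filling a
-- dict of first matches, then emits results in pattern order (alternative decomposition).

-- the fixed pattern list (same literal in A and B)
def pvKeyPatterns : List String :=
  ["import pytest", "from unittest.mock import", "from pathlib import Path",
   "import json", "from scripts.core.adapters"]

-- content.split('\n') ("\n" ≠ "", so split? is always some)
def pvLines (content : String) : List String := (PySem.Str.split? content "\n").getD []

-- ===== PORT A =====
-- A's inner 'for line … break' loop: first line containing the pattern
def pvFirstMatch (pattern : String) : List String → Option String
  | [] => none
  | l :: ls => if PySem.Str.isIn pattern l then some l else pvFirstMatch pattern ls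

def extract_key_imports (content : String) : List String :=
  pvKeyPatterns.foldl (fun imports pattern =>
    if PySem.Str.isIn pattern content then
      match pvFirstMatch pattern (pvLines content) with
      | some line => imports ++ [PySem.Str.strip line]
      | none => imports
    else imports) []

-- ===== PORT B =====
def extract_key_imports_alt (content : String) : List String :=
  let present := pvKeyPatterns.filter (fun p => PySem.Str.isIn p content)
  let firstLine := (pvLines content).foldl (fun d line =>
      present.foldl (fun d p =>
        if !(PySem.Dict.contains d p) && PySem.Str.isIn p line
        then PySem.Dict.insert d p (PySem.Str.strip line) else d) d)
    PySem.Dict.empty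
  present.foldl (fun out p =>
    match PySem.Dict.get? firstLine p with
    | some v => out ++ [v]
    | none => out) []

-- ===== PRECONDITION & SPEC =====
def Spec_extract_key_imports (content : String) (out : List String) : Prop := out = extract_key_imports_alt content
instance (content : String) (out : List String) : Decidable (Spec_extract_key_imports content out) := by unfold Spec_extract_key_imports; infer_instance

-- ===== CLAIM (what is proved, stated in full; the proofs are below) =====
def Claim_equal_extract_key_imports : Prop := ∀ (content : String), Dom_extract_key_imports content → Spec_extract_key_imports content (extract_key_imports content)

-- ===== LEMMAS AND PROOFS =====

-- inner fold over the pattern list: effect on key p's entry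
theorem pv_inner_get? (line : String) (p : String) :
    ∀ (ps : List String) (d : PySem.Dict String String),
    (ps.foldl (fun d q =>
        if !(PySem.Dict.contains d q) && PySem.Str.isIn q line
        then PySem.Dict.insert d q (PySem.Str.strip line) else d) d).get? p =
      if p ∈ ps ∧ d.contains p = false ∧ PySem.Str.isIn p line = true
      then some (PySem.Str.strip line) else d.get? p := by
  intro ps
  induction ps with
  | nil => intro d; simp only [List.foldl_nil, List.not_mem_nil, false_and, if_false]
  | cons q ps ih =>
    intro d
    simp only [List.foldl_cons]
    by_cases hq : q = p
    · subst hq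
      cases hc : d.contains q with
      | false =>
        cases hl : PySem.Str.isIn q line with
        | true =>
          rw [if_pos (by decide)]
          rw [ih]
          have hc' : (d.insert q (PySem.Str.strip line)).contains q = true := by
            rw [PySem.Dict.contains_eq_isSome_get?, PySem.Dict.get?_insert_self]; rfl
          rw [if_neg (by rintro ⟨-, h, -⟩; simp [hc'] at h)]
          rw [PySem.Dict.get?_insert_self]
          rw [if_pos ⟨List.mem_cons_self, rfl, rfl⟩]
        | false =>
          rw [if_neg (by simp)]
          rw [ih]
          rw [if_neg (by rintro ⟨-, -, h⟩; simp_all),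
              if_neg (by rintro ⟨-, -, h⟩; simp_all)]
      | true =>
        rw [if_neg (by simp)]
        rw [ih]
        rw [if_neg (by rintro ⟨-, h, -⟩; simp_all),
            if_neg (by rintro ⟨-, h, -⟩; simp_all)]
    · set d' := (if !(PySem.Dict.contains d q) && PySem.Str.isIn q line
        then PySem.Dict.insert d q (PySem.Str.strip line) else d) with hd'
      have hget : d'.get? p = d.get? p := by
        rw [hd']; split
        · exact PySem.Dict.get?_insert_of_ne _ _ (fun h => hq h.symm)
        · rfl
      have hcont : d'.contains p = d.contains p := by
        rw [PySem.Dict.contains_eq_isSome_get?, PySem.Dict.contains_eq_isSome_get?, hget]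
      rw [ih, hget, hcont]
      by_cases hm : p ∈ ps
      · have hm' : p ∈ q :: ps := List.mem_cons_of_mem _ hm
        simp only [hm, hm', true_and]
      · have hm' : ¬ p ∈ q :: ps := by
          intro h
          cases List.mem_cons.mp h with
          | inl h => exact hq h.symm
          | inr h => exact hm h
        simp only [hm, hm', false_and, if_false]

-- outer fold over the lines: key p ends at its first matching line
theorem pv_outer_get? (p : String) (ps : List String) (hp : p ∈ ps) :
    ∀ (lines : List String) (d : PySem.Dict String String),
    (lines.foldl (fun d line =>
        ps.foldl (fun d q =>
          if !(PySem.Dict.contains d q) && PySem.Str.isIn q line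
          then PySem.Dict.insert d q (PySem.Str.strip line) else d) d) d).get? p =
      match d.get? p with
      | some v => some v
      | none => (pvFirstMatch p lines).map PySem.Str.strip := by
  intro lines
  induction lines with
  | nil =>
    intro d
    cases h : d.get? p <;> · simp only [List.foldl_nil]; exact h
  | cons l ls ih =>
    intro d
    simp only [List.foldl_cons]
    rw [ih]
    rw [pv_inner_get? l p ps d]
    cases h : d.get? p with
    | some v =>
      have hc : d.contains p = true := by
        rw [PySem.Dict.contains_eq_isSome_get?, h]; rfl
      rw [if_neg (by rintro ⟨-, hh, -⟩; simp [hc] at hh)]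
    | none =>
      have hc : d.contains p = false := by
        rw [PySem.Dict.contains_eq_isSome_get?, h]; rfl
      cases hl : PySem.Str.isIn p l with
      | true =>
        rw [if_pos ⟨hp, hc, rfl⟩]
        simp only [pvFirstMatch, hl, if_true, Option.map_some]
      | false =>
        rw [if_neg (by rintro ⟨-, -, hh⟩; simp at hh)]
        simp only [pvFirstMatch, hl, Bool.false_eq_true, if_false]

-- A's outer loop is B's fold over the filtered pattern list
theorem pv_fold_filter (content : String) :
    ∀ (ks : List String) (acc : List String),
    ks.foldl (fun imports pattern =>
      if PySem.Str.isIn pattern content then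
        match pvFirstMatch pattern (pvLines content) with
        | some line => imports ++ [PySem.Str.strip line]
        | none => imports
      else imports) acc =
    (ks.filter (fun p => PySem.Str.isIn p content)).foldl (fun imports pattern =>
      match pvFirstMatch pattern (pvLines content) with
      | some line => imports ++ [PySem.Str.strip line]
      | none => imports) acc := by
  intro ks
  induction ks with
  | nil => intro acc; rfl
  | cons k ks ih =>
    intro acc
    cases hk : PySem.Str.isIn k content with
    | true => rw [List.foldl_cons, if_pos hk, ih, List.filter_cons, if_pos hk, List.foldl_cons]
    | false =>
      rw [List.foldl_cons, if_neg (by rw [hk]; exact Bool.false_ne_true), ih,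
          List.filter_cons, if_neg (by rw [hk]; exact Bool.false_ne_true)]

-- ===== VERDICT (by name: the statement is the Claim_ definition above) =====
theorem extract_key_imports_spec : Claim_equal_extract_key_imports := by
  intro content _
  unfold Spec_extract_key_imports extract_key_imports extract_key_imports_alt
  rw [pv_fold_filter content pvKeyPatterns []]
  apply PySem.List.foldl_congr_mem
  intro acc p hp
  rw [pv_outer_get? p (pvKeyPatterns.filter (fun p => PySem.Str.isIn p content)) hp
      (pvLines content) PySem.Dict.empty]
  rw [PySem.Dict.get?_empty]
  cases h : pvFirstMatch p (pvLines content) with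
  | some line => rfl
  | none => rfl
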